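-- pv_equiv track=rewrite | github.com/phuongngo0320/pipe-ai | src/symbol.py | symbol_row
-- ===== SOURCE A (Python) =====
-- def symbol_row(symbols):
--
--     row = ""
--     for sym in symbols:
--         row += sym[0] + ' '
--     row += "\n"
--     for sym in symbols:
--         row += sym[1] + ' '
--     row += "\n"
--     for sym in symbols:
--         row += sym[2] + ' '
--     row += "\n"
--
--     return row
-- ===== SOURCE B (Python) =====
-- def symbol_row(symbols):
--     # Single pass: build all three rows at once with three accumulators.
--     r0 = r1 = r2 = ""
--     for sym in symbols:
--         r0 += sym[0] + ' '
--         r1 += sym[1] + ' '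
--         r2 += sym[2] + ' '
--     return r0 + "\n" + r1 + "\n" + r2 + "\n"
-- ===== Notes on version B (the rewrite author's own statement) =====
-- stated objective: alternative
-- what changed: Fuses A's three sequential traversals of symbols into a single pass maintaining three row accumulators, assembling the result at the end.
import Mathlib
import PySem

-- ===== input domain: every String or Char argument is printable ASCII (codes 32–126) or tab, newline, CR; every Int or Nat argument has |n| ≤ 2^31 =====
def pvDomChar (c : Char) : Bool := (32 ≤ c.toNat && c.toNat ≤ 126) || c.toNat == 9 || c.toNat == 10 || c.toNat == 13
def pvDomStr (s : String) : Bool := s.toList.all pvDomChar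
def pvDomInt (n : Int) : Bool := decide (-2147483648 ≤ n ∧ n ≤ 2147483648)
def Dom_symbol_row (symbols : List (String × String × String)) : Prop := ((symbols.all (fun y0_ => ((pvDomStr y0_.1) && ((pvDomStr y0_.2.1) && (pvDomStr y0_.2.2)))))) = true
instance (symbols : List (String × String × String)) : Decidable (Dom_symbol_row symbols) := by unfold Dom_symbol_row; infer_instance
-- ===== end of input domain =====

-- B fuses A's three sequential traversals into one pass with three accumulators (objective: alternative decomposition).

-- ===== PORT A =====
-- A: three successive for-loops, each appending to the single accumulator `row`.
def symbol_row (symbols : List (String × String × String)) : String :=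
  let row := ""
  let row := symbols.foldl (fun r sym => r ++ sym.1 ++ " ") row
  let row := row ++ "\n"
  let row := symbols.foldl (fun r sym => r ++ sym.2.1 ++ " ") row
  let row := row ++ "\n"
  let row := symbols.foldl (fun r sym => r ++ sym.2.2 ++ " ") row
  let row := row ++ "\n"
  row

-- ===== PORT B =====
-- B: one loop over symbols maintaining the three accumulators (r0, r1, r2) together.
def symbol_row_alt (symbols : List (String × String × String)) : String :=
  let acc := symbols.foldl
    (fun (acc : String × String × String) sym =>
      (acc.1 ++ sym.1 ++ " ", acc.2.1 ++ sym.2.1 ++ " ", acc.2.2 ++ sym.2.2 ++ " "))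
    ("", "", "")
  acc.1 ++ "\n" ++ acc.2.1 ++ "\n" ++ acc.2.2 ++ "\n"

-- ===== PRECONDITION & SPEC =====
def Spec_symbol_row (symbols : List (String × String × String)) (out : String) : Prop := out = symbol_row_alt symbols
instance (symbols : List (String × String × String)) (out : String) : Decidable (Spec_symbol_row symbols out) := by unfold Spec_symbol_row; infer_instance

-- ===== CLAIM (what is proved, stated in full; the proofs are below) =====
def Claim_equal_symbol_row : Prop := ∀ (symbols : List (String × String × String)), Dom_symbol_row symbols → Spec_symbol_row symbols (symbol_row symbols)

-- ===== LEMMAS AND PROOFS =====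

-- B's fused fold splits into the three independent folds A performs.
theorem fused_fold_eq (symbols : List (String × String × String))
    (a b c : String) :
    symbols.foldl
      (fun (acc : String × String × String) sym =>
        (acc.1 ++ sym.1 ++ " ", acc.2.1 ++ sym.2.1 ++ " ", acc.2.2 ++ sym.2.2 ++ " "))
      (a, b, c)
    = (symbols.foldl (fun r sym => r ++ sym.1 ++ " ") a,
       symbols.foldl (fun r sym => r ++ sym.2.1 ++ " ") b,
       symbols.foldl (fun r sym => r ++ sym.2.2 ++ " ") c) := by
  induction symbols generalizing a b c with
  | nil => rfl
  | cons hd tl ih => simp [List.foldl, ih]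

-- A's second and third loops start from an accumulator that already holds the earlier
-- rows; pulling that prefix out of the fold lets A's value be rearranged into B's shape.
theorem foldl_pull_prefix (f : String × String × String → String)
    (symbols : List (String × String × String)) (p a : String) :
    symbols.foldl (fun r sym => r ++ f sym ++ " ") (p ++ a)
    = p ++ symbols.foldl (fun r sym => r ++ f sym ++ " ") a := by
  induction symbols generalizing a with
  | nil => rfl
  | cons hd tl ih => simpa [List.foldl, String.append_assoc] using ih (a ++ (f hd ++ " "))

-- ===== VERDICT (by name: the statement is the Claim_ definition above) =====
theorem symbol_row_spec : Claim_equal_symbol_row := by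
  intro symbols _
  unfold Spec_symbol_row symbol_row symbol_row_alt
  simp only [fused_fold_eq]
  rw [show (symbols.foldl (fun r sym => r ++ sym.1 ++ " ") "" ++ "\n") =
      ((symbols.foldl (fun r sym => r ++ sym.1 ++ " ") "" ++ "\n") ++ "") by simp,
    foldl_pull_prefix (fun sym => sym.2.1)]
  rw [show ((symbols.foldl (fun r sym => r ++ sym.1 ++ " ") "" ++ "\n") ++
        symbols.foldl (fun r sym => r ++ sym.2.1 ++ " ") "" ++ "\n") =
      (((symbols.foldl (fun r sym => r ++ sym.1 ++ " ") "" ++ "\n" ++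
        symbols.foldl (fun r sym => r ++ sym.2.1 ++ " ") "" ++ "\n")) ++ "") by
        simp [String.append_assoc],
    foldl_pull_prefix (fun sym => sym.2.2)]
  simp [String.append_assoc]
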